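-- pv_equiv track=rewrite | github.com/euske/github-data-2014 | tools/parse_c.py | fakecpp
-- ===== SOURCE A (Python) =====
-- def fakecpp(lines):
--     decl = False
--     for line in lines:
--         if decl or line.lstrip().startswith('#'):
--             decl = line.rstrip().endswith('\\')
--         else:
--             yield line
--     return
-- ===== SOURCE B (Python) =====
-- _S = object()
--
-- def fakecpp(lines):
--     it = iter(lines)
--     for line in it:
--         if line.lstrip().startswith('#'):
--             # consume a directive and all of its backslash-continuation lines
--             while line.rstrip().endswith('\\'):
--                 line = next(it, _S)
--                 if line is _S:
--                     return
--         else: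
--             yield line
-- ===== Notes on version B (the rewrite author's own statement) =====
-- stated objective: alternative
-- what changed: Replaces the carried 'decl' boolean state machine with an explicit iterator and a nested inner loop that consumes a directive line together with all its backslash-continuation lines at once.
import Mathlib
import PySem

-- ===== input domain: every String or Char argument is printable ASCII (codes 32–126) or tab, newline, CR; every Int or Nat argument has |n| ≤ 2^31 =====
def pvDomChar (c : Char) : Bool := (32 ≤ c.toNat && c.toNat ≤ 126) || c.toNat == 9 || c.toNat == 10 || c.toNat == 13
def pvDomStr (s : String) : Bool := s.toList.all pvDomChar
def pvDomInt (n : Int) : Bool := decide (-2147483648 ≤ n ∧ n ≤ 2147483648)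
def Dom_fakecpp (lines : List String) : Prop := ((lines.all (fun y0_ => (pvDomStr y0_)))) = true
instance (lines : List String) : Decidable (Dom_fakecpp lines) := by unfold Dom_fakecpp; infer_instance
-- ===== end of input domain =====

-- B replaces A's carried 'decl' flag with nested consumption of each directive
-- and its continuation lines (alternative decomposition; same cost).

-- ===== PORT A =====
-- A: a single loop carrying the boolean 'decl'; a directive (or continuation)
-- line sets decl from its own trailing backslash, other lines are yielded.
def fakecppGo (decl : Bool) : List String → List String
  | [] => []
  | line :: rest =>
      if decl || PySem.Str.startswith (PySem.Str.lstrip line) "#" then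
        fakecppGo (PySem.Str.endswith (PySem.Str.rstrip line) "\\") rest
      else
        line :: fakecppGo decl rest

def fakecpp (lines : List String) : List String := fakecppGo false lines

-- ===== PORT B =====
-- B: mutual recursion: 'fakecppSkip line rest' is the inner while-loop that
-- consumes continuation lines as long as 'line' ends with a backslash
-- (returning, i.e. [], when the iterator is exhausted), then resumes the outer loop.
mutual
  def fakecppOuter : List String → List String
    | [] => []
    | line :: rest =>
        if PySem.Str.startswith (PySem.Str.lstrip line) "#" then
          fakecppSkip line rest
        else
          line :: fakecppOuter rest
  termination_by ls => (ls.length, 0)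

  def fakecppSkip (line : String) (rest : List String) : List String :=
    if PySem.Str.endswith (PySem.Str.rstrip line) "\\" then
      match rest with
      | [] => []
      | nxt :: rest' => fakecppSkip nxt rest'
    else
      fakecppOuter rest
  termination_by (rest.length, 1)
end

def fakecpp_alt (lines : List String) : List String := fakecppOuter lines

-- ===== PRECONDITION & SPEC =====
def Spec_fakecpp (lines : List String) (out : List String) : Prop := out = fakecpp_alt lines
instance (lines : List String) (out : List String) : Decidable (Spec_fakecpp lines out) := by unfold Spec_fakecpp; infer_instance

-- ===== CLAIM (what is proved, stated in full; the proofs are below) =====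
def Claim_equal_fakecpp : Prop := ∀ (lines : List String), Dom_fakecpp lines → Spec_fakecpp lines (fakecpp lines)

-- ===== LEMMAS AND PROOFS =====
-- A's loop with decl = false agrees with B's outer loop, and A's loop seeded
-- with the backslash-flag of a given line agrees with B's inner skip loop.
theorem fakecpp_agree (ls : List String) :
    fakecppGo false ls = fakecppOuter ls ∧
    ∀ line, fakecppGo (PySem.Str.endswith (PySem.Str.rstrip line) "\\") ls = fakecppSkip line ls := by
  induction ls with
  | nil =>
      refine ⟨by rw [fakecppGo, fakecppOuter], fun line => ?_⟩
      rw [fakecppSkip]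
      by_cases h : PySem.Str.endswith (PySem.Str.rstrip line) "\\" = true <;>
        simp [fakecppGo, fakecppOuter]
  | cons l rest ih =>
      have houter : fakecppGo false (l :: rest) = fakecppOuter (l :: rest) := by
        rw [fakecppGo, fakecppOuter]
        by_cases h : PySem.Str.startswith (PySem.Str.lstrip l) "#" = true
        · rw [Bool.false_or, if_pos h, if_pos h]
          exact ih.2 l
        · rw [Bool.false_or, if_neg h, if_neg h, ih.1]
      refine ⟨houter, fun line => ?_⟩
      rw [fakecppSkip]
      by_cases h : PySem.Str.endswith (PySem.Str.rstrip line) "\\" = true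
      · rw [fakecppGo, h, Bool.true_or, if_pos rfl, if_pos rfl]
        exact ih.2 l
      · simp only [Bool.not_eq_true] at h
        rw [h, if_neg (by simp)]
        exact houter

-- ===== VERDICT (by name: the statement is the Claim_ definition above) =====
theorem fakecpp_spec : Claim_equal_fakecpp := by
  intro lines _
  show fakecpp lines = fakecpp_alt lines
  exact (fakecpp_agree lines).1
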